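-- pv_equiv track=rewrite | github.com/mikedougherty/advent-of-code | day-06/main.py | find_header
-- ===== SOURCE A (Python) =====
-- def find_header(s, sz):
--     window = []
--     for i, ch in enumerate(s):
--         window.append(ch)
--         if len(window) > sz:
--             window.pop(0)
--
--         # If N unique characters in an N-sized window... success
--         if len(set(window)) == sz:
--             return i + 1
-- ===== SOURCE B (Python) =====
-- def find_header(s, sz):
--     # Sliding window over the longest all-distinct suffix: `start` is the left
--     # edge of the current distinct run, `last` maps each char to its last index.
--     last = {}
--     start = 0
--     for i, ch in enumerate(s):
--         if last.get(ch, -1) >= start: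
--             start = last[ch] + 1
--         last[ch] = i
--         if i - start + 1 >= sz:
--             return i + 1
--     return None
-- ===== Notes on version B (the rewrite author's own statement) =====
-- stated objective: faster
-- what changed: Replaces the explicit window list with set() distinctness checks per step by a sliding window over the longest all-distinct suffix, maintained with a last-seen-index dict and a left edge, O(1) per character.
-- outside the precondition, e.g. on find_header('x', -3): A returns None, B returns 1
import Mathlib
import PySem

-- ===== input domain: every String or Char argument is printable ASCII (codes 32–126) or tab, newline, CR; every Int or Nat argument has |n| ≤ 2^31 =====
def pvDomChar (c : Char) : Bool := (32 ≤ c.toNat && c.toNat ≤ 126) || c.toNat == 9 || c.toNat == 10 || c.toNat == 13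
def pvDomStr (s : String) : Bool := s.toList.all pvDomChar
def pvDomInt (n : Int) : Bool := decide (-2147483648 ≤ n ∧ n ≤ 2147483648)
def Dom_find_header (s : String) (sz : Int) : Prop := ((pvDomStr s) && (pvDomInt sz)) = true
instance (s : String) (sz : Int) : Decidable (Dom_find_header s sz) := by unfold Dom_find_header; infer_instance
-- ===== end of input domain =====

-- B replaces A's per-step window list + set() distinctness check by a sliding window over the
-- longest all-distinct suffix (last-seen-index dict + left edge), O(1) dict work per character.

-- ===== PORT A =====
def aLoop (sz : Int) : List Char → Int → List Char → Option Int
  | [], _, _ => none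
  | ch :: rest, i, window =>
    let w1 := window ++ [ch]
    let w2 := if (w1.length : Int) > sz then w1.tail else w1
    if ((PySem.Set.ofList w2).length : Int) = sz then some (i + 1)
    else aLoop sz rest (i + 1) w2

def find_header (s : String) (sz : Int) : Option Int :=
  aLoop sz s.toList 0 []

-- ===== PORT B =====
def bLoop (sz : Int) : List Char → Int → PySem.Dict Char Int → Int → Option Int
  | [], _, _, _ => none
  | ch :: rest, i, last, start =>
    let start' := if last.getD ch (-1) ≥ start then last.getD ch (-1) + 1 else start
    let last' := last.insert ch i
    if i - start' + 1 ≥ sz then some (i + 1)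
    else bLoop sz rest (i + 1) last' start'

def find_header_alt (s : String) (sz : Int) : Option Int :=
  bLoop sz s.toList 0 PySem.Dict.empty 0

-- ===== PRECONDITION & SPEC =====
-- Pre_ excludes negative sz (a meaningless window size, outside the task's natural domain):
-- there A returns None vacuously while B's sliding window exits at once.
def Pre_find_header (s : String) (sz : Int) : Prop := 0 ≤ sz
instance (s : String) (sz : Int) : Decidable (Pre_find_header s sz) := by unfold Pre_find_header; infer_instance
def pvWitness_find_header : String × Int := ("abcabcd", 4)
def Spec_find_header (s : String) (sz : Int) (out : Option Int) : Prop := out = find_header_alt s sz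
instance (s : String) (sz : Int) (out : Option Int) : Decidable (Spec_find_header s sz out) := by unfold Spec_find_header; infer_instance

-- ===== CLAIM (what is proved, stated in full; the proofs are below) =====
def Claim_equal_find_header : Prop := ∀ (s : String) (sz : Int), Dom_find_header s sz → Pre_find_header s sz → Spec_find_header s sz (find_header s sz)

-- ===== LEMMAS AND PROOFS =====

-- seg l a b = the sublist of l at positions [a, b)
def seg (l : List Char) (a b : Nat) : List Char := (l.take b).drop a
theorem length_seg (l : List Char) (a b : Nat) : (seg l a b).length = min b l.length - a := by
  simp [seg]
theorem getElem_seg (l : List Char) (a b j : Nat) (h1 : a + j < b) (h2 : a + j < l.length)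
    (hj : j < (seg l a b).length) : (seg l a b)[j] = l[a + j] := by
  simp [seg, List.getElem_drop, List.getElem_take]
theorem mem_seg (l : List Char) (a b : Nat) (x : Char) :
    x ∈ seg l a b ↔ ∃ j, ∃ h : j < l.length, a ≤ j ∧ j < b ∧ l[j] = x := by
  constructor
  · intro hx
    obtain ⟨i, hi, hix⟩ := List.mem_iff_getElem.mp hx
    have hlen : (seg l a b).length = min b l.length - a := by simp [seg]
    refine ⟨a + i, by omega, by omega, by omega, ?_⟩
    rw [← getElem_seg l a b i (by omega) (by omega) hi]; exact hix
  · rintro ⟨j, h, haj, hjb, rfl⟩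
    have hlen : (seg l a b).length = min b l.length - a := by simp [seg]
    have : (seg l a b)[j - a]'(by omega) = l[a + (j - a)]'(by omega) :=
      getElem_seg l a b (j - a) (by omega) (by omega) (by omega)
    rw [List.mem_iff_getElem]
    exact ⟨j - a, by omega, by rw [this]; congr 1; omega⟩
theorem seg_succ (l : List Char) (a k : Nat) (hak : a ≤ k) (hk : k < l.length) :
    seg l a (k + 1) = seg l a k ++ [l[k]] := by
  unfold seg
  rw [List.take_add_one, List.getElem?_eq_getElem hk]
  rw [List.drop_append_of_le_length (by simp; omega)]
  rfl
theorem seg_drop (l : List Char) (a b t : Nat) (hab : a ≤ b) :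
    seg l b t = (seg l a t).drop (b - a) := by
  simp [seg, List.drop_drop]; congr 1; omega
theorem nodup_seg_mono (l : List Char) (a b t : Nat) (hab : a ≤ b)
    (h : (seg l a t).Nodup) : (seg l b t).Nodup := by
  rw [seg_drop l a b t hab]; exact h.sublist (List.drop_sublist _ _)
theorem not_nodup_seg (l : List Char) (a m k : Nat) (hm : m < l.length) (hk : k < l.length)
    (ham : a ≤ m) (hmk : m < k) (heq : l[m] = l[k]) : ¬ (seg l a (k + 1)).Nodup := by
  intro h
  have hlen : (seg l a (k+1)).length = min (k+1) l.length - a := by simp [seg]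
  have h1 : (seg l a (k+1))[m - a]'(by omega) = l[a + (m-a)]'(by omega) :=
    getElem_seg l a (k+1) (m - a) (by omega) (by omega) (by omega)
  have h2 : (seg l a (k+1))[k - a]'(by omega) = l[a + (k-a)]'(by omega) :=
    getElem_seg l a (k+1) (k - a) (by omega) (by omega) (by omega)
  have : m - a = k - a := by
    apply (List.Nodup.getElem_inj_iff h).mp
    rw [h1, h2]
    have e1 : a + (m - a) = m := by omega
    have e2 : a + (k - a) = k := by omega
    simp_rw [e1, e2]; exact heq
  omega
theorem len_ofList_eq_iff (W : List Char) :
    (PySem.Set.ofList W).length = W.length ↔ W.Nodup := by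
  induction W using List.reverseRecOn with
  | nil => simp
  | append_singleton xs x ih =>
    rw [PySem.Set.ofList_append_singleton]
    unfold PySem.Set.add
    by_cases hx : x ∈ xs
    · have hc : (PySem.Set.ofList xs).contains x = true := by
        simp [PySem.Set.contains, PySem.Set.mem_ofList]; exact hx
      rw [if_pos hc]
      have hle := PySem.Set.length_ofList_le (xs := xs)
      have hnd : ¬ (xs ++ [x]).Nodup := fun h => (List.nodup_append.mp h).2.2 x hx x (by simp) rfl
      simp only [List.length_append, List.length_cons, List.length_nil]
      exact ⟨fun h => absurd h (by omega), fun h => absurd h hnd⟩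
    · have hc : ¬ ((PySem.Set.ofList xs).contains x = true) := by
        simp [PySem.Set.contains, PySem.Set.mem_ofList]; exact hx
      rw [if_neg hc]
      simp [List.nodup_append, ih]
      intro _
      rintro a ha rfl
      exact hx ha


theorem loops_eq (sz : Int) (hsz : 0 ≤ sz) (l : List Char) :
    ∀ (n k : Nat) (window : List Char) (last : PySem.Dict Char Int) (start : Nat),
      l.length - k = n →
      window = seg l (k - sz.toNat) k →
      start ≤ k →
      (seg l start k).Nodup →
      (∀ a, (seg l a k).Nodup → start ≤ a) →
      (∀ c : Char, (∀ j, (hj : j < l.length) → j < k → l[j] ≠ c) → last.getD c (-1) = -1) →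
      (∀ j, (hj : j < l.length) → j < k →
        ∃ m, ∃ hm : m < l.length, m < k ∧ l[m] = l[j] ∧ last.getD (l[j]) (-1) = (m : Int) ∧
          ∀ j', (hj' : j' < l.length) → j' < k → l[j'] = l[j] → j' ≤ m) →
      aLoop sz (l.drop k) (k : Int) window = bLoop sz (l.drop k) (k : Int) last start := by
  intro n
  induction n with
  | zero =>
    intro k window last start hn _ _ _ _ _ _
    rw [List.drop_eq_nil_of_le (by omega)]
    simp [aLoop, bLoop]
  | succ n ih =>
    intro k window last start hn hw hstk hnd hmin hnone hsome
    have hk : k < l.length := by omega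
    set szN := sz.toNat with hszN
    have hszc : (szN : Int) = sz := Int.toNat_of_nonneg hsz
    have hdrop : l.drop k = l[k] :: l.drop (k + 1) := List.drop_eq_getElem_cons hk
    set c := l[k] with hc
    rw [hdrop]
    simp only [aLoop, bLoop]
    have hw1 : window ++ [c] = seg l (k - szN) (k + 1) := by
      rw [hw, ← seg_succ l (k - szN) k (by omega) hk]
    have hwlen : window.length = k - (k - szN) := by
      rw [hw, length_seg]; omega
    have hw2 : (if ((window ++ [c]).length : Int) > sz then (window ++ [c]).tail
        else (window ++ [c])) = seg l (k + 1 - szN) (k + 1) := by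
      by_cases hcase : szN ≤ k
      · rw [if_pos (by simp [hwlen]; omega)]
        rw [hw1]
        have e1 : seg l (k + 1 - szN) (k + 1) = (seg l (k - szN) (k + 1)).drop ((k + 1 - szN) - (k - szN)) :=
          seg_drop l (k - szN) (k + 1 - szN) (k + 1) (by omega)
        rw [e1]
        have e2 : (k + 1 - szN) - (k - szN) = 1 := by omega
        rw [e2, ← List.tail_drop]
        simp
      · rw [if_neg (by simp [hwlen]; omega)]
        rw [hw1]
        congr 1
        omega
    rw [hw2]
    set W := seg l (k + 1 - szN) (k + 1) with hW
    have hWlen : W.length = min (k + 1) szN := by rw [hW, length_seg]; omega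
    -- invariants for the updated dict, shared by all cases
    have hnone' : ∀ c' : Char, (∀ j, (hj : j < l.length) → j < k + 1 → l[j] ≠ c') →
        (last.insert c (k : Int)).getD c' (-1) = -1 := by
      intro c' hno
      have hcc : c' ≠ c := fun he => hno k hk (by omega) he.symm
      rw [PySem.Dict.getD_insert, if_neg hcc]
      exact hnone c' (fun j hj hjk => hno j hj (by omega))
    have hsome' : ∀ j, (hj : j < l.length) → j < k + 1 →
        ∃ m', ∃ hm' : m' < l.length, m' < k + 1 ∧ l[m'] = l[j] ∧
          (last.insert c (k : Int)).getD (l[j]) (-1) = (m' : Int) ∧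
          ∀ j', (hj' : j' < l.length) → j' < k + 1 → l[j'] = l[j] → j' ≤ m' := by
      intro j hj hjk1
      by_cases hjc : l[j] = c
      · refine ⟨k, hk, by omega, by rw [hjc], ?_, ?_⟩
        · rw [hjc, PySem.Dict.getD_insert_self]
        · intro j' hj' hj'k _; omega
      · have hjk : j < k := by
          by_contra hge
          have hjeq : j = k := by omega
          subst hjeq
          exact hjc hc.symm
        obtain ⟨m, hm, hmk, hme, hgd, hmax⟩ := hsome j hj hjk
        refine ⟨m, hm, by omega, hme, ?_, ?_⟩
        · rw [PySem.Dict.getD_insert, if_neg hjc, hgd]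
        · intro j' hj' hj'k1 hj'e
          have hj'k : j' < k := by
            by_contra hge
            have hj'eq : j' = k := by omega
            subst hj'eq
            exact hjc (hj'e.symm.trans hc.symm)
          exact hmax j' hj' hj'k hj'e
    -- shared continuation: given the new left edge with its invariants, both sides agree
    have main : ∀ startN' : Nat,
        startN' ≤ k + 1 →
        (seg l startN' (k + 1)).Nodup →
        (∀ a, (seg l a (k + 1)).Nodup → startN' ≤ a) →
        (if ((PySem.Set.ofList W).length : Int) = sz then some ((k : Int) + 1)
          else aLoop sz (l.drop (k + 1)) ((k : Int) + 1) W)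
        = (if (k : Int) - (startN' : Int) + 1 ≥ sz then some ((k : Int) + 1)
          else bLoop sz (l.drop (k + 1)) ((k : Int) + 1) (last.insert c (k : Int)) (startN' : Int)) := by
      intro s' hs'k hnd' hmin'
      have hcond : (((PySem.Set.ofList W).length : Int) = sz) ↔ ((k : Int) - (s' : Int) + 1 ≥ sz) := by
        constructor
        · intro hA
          have hle := PySem.Set.length_ofList_le (xs := W)
          have hWl : W.length = szN := by omega
          have hWnd : W.Nodup := (len_ofList_eq_iff W).mp (by omega)
          have hsk1 : szN ≤ k + 1 := by omega
          have hmin2 : s' ≤ k + 1 - szN := hmin' _ hWnd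
          omega
        · intro hB
          have hsk1 : szN ≤ k + 1 := by omega
          have hs'le : s' ≤ k + 1 - szN := by omega
          have hWnd : W.Nodup := nodup_seg_mono l s' (k + 1 - szN) (k + 1) hs'le hnd'
          have hWl : W.length = szN := by omega
          have := (len_ofList_eq_iff W).mpr hWnd
          omega
      by_cases hB : (k : Int) - (s' : Int) + 1 ≥ sz
      · rw [if_pos hB, if_pos (hcond.mpr hB)]
      · rw [if_neg hB, if_neg (fun h => hB (hcond.mp h))]
        have e : ((k : Int) + 1) = ((k + 1 : Nat) : Int) := by push_cast; ring
        rw [e]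
        exact ih (k + 1) W (last.insert c (k : Int)) s' (by omega) (by rw [hW]) hs'k hnd' hmin' hnone' hsome'
    -- now resolve B's branch and feed `main`
    by_cases hocc : ∃ j, ∃ hj : j < l.length, j < k ∧ l[j] = c
    case neg =>
      have hg : last.getD c (-1) = -1 := by
        apply hnone
        intro j hj hjk hne
        exact hocc ⟨j, hj, hjk, hne⟩
      rw [hg, if_neg (show ¬((-1:Int) ≥ (start : Int)) by omega)]
      have hnd' : (seg l start (k + 1)).Nodup := by
        rw [seg_succ l start k hstk hk, List.nodup_append]
        refine ⟨hnd, by simp, ?_⟩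
        rintro a ha b hb rfl
        simp only [List.mem_singleton] at hb
        subst hb
        obtain ⟨j, hj, hsj, hjk, hje⟩ := (mem_seg l start k c).mp ha
        exact hocc ⟨j, hj, hjk, hje⟩
      have hmin' : ∀ a, (seg l a (k + 1)).Nodup → start ≤ a := by
        intro a hand
        by_cases hak : a ≤ k
        · apply hmin
          rw [seg_succ l a k hak hk] at hand
          exact (List.nodup_append.mp hand).1
        · omega
      exact main start (by omega) hnd' hmin'
    case pos =>
      obtain ⟨j0, hj0, hj0k, hj0e⟩ := hocc
      obtain ⟨m, hm, hmk, hme, hgd, hmax⟩ := by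
        have h := hsome j0 hj0 hj0k
        rwa [hj0e] at h
      rw [hgd]
      by_cases hms : start ≤ m
      · rw [if_pos (show ((m:Int)) ≥ (start : Int) by push_cast; omega)]
        have hnd' : (seg l (m + 1) (k + 1)).Nodup := by
          rw [seg_succ l (m + 1) k (by omega) hk, List.nodup_append]
          refine ⟨nodup_seg_mono l start (m + 1) k (by omega) hnd, by simp, ?_⟩
          rintro a ha b hb rfl
          simp only [List.mem_singleton] at hb
          subst hb
          obtain ⟨j, hj, hsj, hjk, hje⟩ := (mem_seg l (m + 1) k c).mp ha
          have := hmax j hj hjk hje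
          omega
        have hmin' : ∀ a, (seg l a (k + 1)).Nodup → m + 1 ≤ a := by
          intro a hand
          by_contra hcon
          exact not_nodup_seg l a m k hm hk (by omega) hmk (hme.trans hc) hand
        have e : ((m : Int) + 1) = ((m + 1 : Nat) : Int) := by push_cast; ring
        rw [e]
        exact main (m + 1) (by omega) hnd' hmin'
      · rw [if_neg (show ¬((m:Int) ≥ (start : Int)) by push_cast; omega)]
        have hnd' : (seg l start (k + 1)).Nodup := by
          rw [seg_succ l start k hstk hk, List.nodup_append]
          refine ⟨hnd, by simp, ?_⟩
          rintro a ha b hb rfl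
          simp only [List.mem_singleton] at hb
          subst hb
          obtain ⟨j, hj, hsj, hjk, hje⟩ := (mem_seg l start k c).mp ha
          have := hmax j hj hjk hje
          omega
        have hmin' : ∀ a, (seg l a (k + 1)).Nodup → start ≤ a := by
          intro a hand
          by_cases hak : a ≤ k
          · apply hmin
            rw [seg_succ l a k hak hk] at hand
            exact (List.nodup_append.mp hand).1
          · omega
        exact main start (by omega) hnd' hmin'

-- ===== VERDICT (by name: the statement is the Claim_ definition above) =====
theorem find_header_spec : Claim_equal_find_header := by
  intro s sz _hdom hpre
  unfold Spec_find_header find_header find_header_alt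
  have h := loops_eq sz hpre s.toList s.toList.length 0 [] PySem.Dict.empty 0
  simpa using h (by omega) (by simp [seg]) (by omega) (by simp [seg]) (by omega)
    (by intro c _; simp) (by intro j hj hj0; omega)
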